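-- pv_equiv track=rewrite | github.com/Watrushka1/Python | 34.py | check_rhythm
-- ===== SOURCE A (Python) =====
-- def check_rhythm(poem):
--     lines = poem.split()
--     syllables_count = None
--
--     for line in lines:
--         words = line.split('-')  # Разделяем фразу на слова
--
--         current_syllables_count = sum(1 for word in words for letter in word if letter.lower() in 'aeiouаеёиоуыэюя')
--
--         if syllables_count is None:
--             syllables_count = current_syllables_count
--         elif syllables_count != current_syllables_count:
--             return "Пам парам"
--
--     return "Парам пам-пам"
-- ===== SOURCE B (Python) =====
-- def check_rhythm(poem):
--     vowels = 'aeiouаеёиоуыэюя'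
--     # '-' is never a vowel, so filtering a whole line equals A's sum over its '-'-split words.
--     its = [iter([ch for ch in line if ch.lower() in vowels]) for line in poem.split()]
--     # Consume one vowel from every line in lockstep; lines rhyme iff all streams run dry together.
--     while True:
--         exhausted = [next(it, None) is None for it in its]
--         if all(exhausted):
--             return "Парам пам-пам"
--         if any(exhausted):
--             return "Пам парам"
-- ===== Notes on version B (the rewrite author's own statement) =====
-- stated objective: alternative
-- what changed: B never compares syllable counts: it reduces each line to an iterator over its vowels and consumes one vowel from every iterator in lockstep, answering 'Пам парам' at the first round where some iterators are exhausted and others are not, instead of A's count-per-line-and-compare-to-first early-exit loop.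
import Mathlib
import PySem

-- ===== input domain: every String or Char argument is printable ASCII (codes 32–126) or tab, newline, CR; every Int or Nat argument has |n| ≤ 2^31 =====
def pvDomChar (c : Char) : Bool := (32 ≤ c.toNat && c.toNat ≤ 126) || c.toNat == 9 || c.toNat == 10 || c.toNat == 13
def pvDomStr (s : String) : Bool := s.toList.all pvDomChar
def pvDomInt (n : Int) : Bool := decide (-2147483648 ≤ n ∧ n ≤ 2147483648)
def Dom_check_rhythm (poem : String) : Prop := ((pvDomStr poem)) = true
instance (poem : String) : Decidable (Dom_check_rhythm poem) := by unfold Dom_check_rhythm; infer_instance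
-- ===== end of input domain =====

-- B replaces A's count-per-line-and-compare loop by a lockstep consumption of each line's
-- vowel iterator (no counts compared); objective: alternative decomposition, same cost class.


-- ===== PORT A =====
-- `letter.lower() in 'aeiouаеёиоуыэюя'`: for a single char, Python substring membership = char membership.
def pvIsVowel (letter : Char) : Bool := "aeiouаеёиоуыэюя".toList.contains (PySem.Chars.lowerChar letter)

-- `sum(1 for word in words for letter in word if letter.lower() in …)` over words = line.split('-')
-- (Chars.splitOn is PySem's sep ≠ "" form of str.split(sep); words kept as List Char)
def pvCountA (line : String) : Int :=
  (((PySem.Chars.splitOn line.toList ['-']).flatMap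
      (fun word => word.filter (fun letter => pvIsVowel letter))).length : Int)

def pvLoopA : List String → Option Int → String
  | [], _ => "Парам пам-пам"
  | line :: rest, syl =>
    let cur := pvCountA line
    match syl with
    | none => pvLoopA rest (some cur)
    | some n => if n ≠ cur then "Пам парам" else pvLoopA rest (some n)

def check_rhythm (poem : String) : String :=
  pvLoopA (PySem.Str.split₀ poem) none

-- ===== PORT B =====
-- `[ch for ch in line if ch.lower() in vowels]`
def pvStrip (line : String) : List Char := line.toList.filter pvIsVowel

-- termination measure argument for the lockstep loop (cited by pvLock's decreasing_by)
lemma pv_lock_dec (ss : List (List Char))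
    (hall : ¬ (ss.all (fun s => s.isEmpty)) = true)
    (hany : ¬ (ss.any (fun s => s.isEmpty)) = true) :
    ((ss.map (fun s => s.drop 1)).map List.length).sum < (ss.map List.length).sum := by
  simp only [List.any_eq_true, not_exists, not_and] at hany
  have hne : ∀ s ∈ ss, s ≠ [] := by
    intro s hs
    have := hany s hs
    simpa using this
  have hss : ss ≠ [] := by
    rintro rfl
    exact hall (by simp)
  obtain ⟨s0, hs0⟩ := List.exists_mem_of_ne_nil ss hss
  rw [List.map_map]
  refine List.sum_lt_sum _ _ (fun s _ => by simp) ⟨s0, hs0, ?_⟩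
  have := List.length_pos_iff.mpr (hne s0 hs0)
  simp; omega

-- the `while True:` lockstep loop; an iterator's remaining elements are modelled as a list,
-- `next(it, None) is None` = isEmpty of the remainder, consumption = drop 1 on each remainder;
-- the `exhausted` list is fused into all/any (each remainder still inspected once per round)
def pvLock (ss : List (List Char)) : String :=
  if ss.all (fun s => s.isEmpty) then "Парам пам-пам"
  else if ss.any (fun s => s.isEmpty) then "Пам парам"
  else pvLock (ss.map (fun s => s.drop 1))
termination_by (ss.map List.length).sum
decreasing_by
  rename_i hall hany
  have h := pv_lock_dec ss hall hany
  simpa [List.map_attach_eq_pmap, List.pmap_eq_map, List.map_map, Function.comp_def] using h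

def check_rhythm_alt (poem : String) : String :=
  pvLock ((PySem.Str.split₀ poem).map pvStrip)

-- ===== PRECONDITION & SPEC =====
def Spec_check_rhythm (poem : String) (out : String) : Prop := out = check_rhythm_alt poem
instance (poem : String) (out : String) : Decidable (Spec_check_rhythm poem out) := by unfold Spec_check_rhythm; infer_instance

-- ===== CLAIM (what is proved, stated in full; the proofs are below) =====
def Claim_equal_check_rhythm : Prop := ∀ (poem : String), Dom_check_rhythm poem → Spec_check_rhythm poem (check_rhythm poem)

-- ===== LEMMAS AND PROOFS =====

-- summing vowel counts over the '-'-split pieces counts the vowels of the whole line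
lemma pv_go_sum : ∀ (fuel : Nat) (l cur : List Char) (acc : List (List Char)),
    ((PySem.Chars.splitOn.go ['-'] fuel l cur acc).map (fun w => w.countP pvIsVowel)).sum
      = (acc.map (fun w => w.countP pvIsVowel)).sum + cur.countP pvIsVowel + l.countP pvIsVowel := by
  intro fuel
  induction fuel with
  | zero =>
    intro l cur acc
    simp [PySem.Chars.splitOn.go, List.countP_append, List.countP_reverse]
    omega
  | succ fuel ih =>
    intro l cur acc
    cases l with
    | nil =>
      simp [PySem.Chars.splitOn.go, List.countP_reverse]
    | cons c rest =>
      by_cases hpre : List.isPrefixOf ['-'] (c :: rest) = true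
      · have hc : c = '-' := by
          simp [List.isPrefixOf] at hpre; exact hpre.symm
        have hv : pvIsVowel '-' = false := by decide
        simp only [PySem.Chars.splitOn.go, hpre, if_pos]
        rw [ih]
        subst hc
        simp [List.countP_reverse, hv]
        omega
      · simp only [PySem.Chars.splitOn.go, hpre, if_neg, Bool.false_eq_true, not_false_iff]
        rw [ih]
        simp [List.countP_cons]
        omega

-- A's per-line count is the length of B's vowel stream for that line
lemma pv_count_strip (line : String) : pvCountA line = ((pvStrip line).length : Int) := by
  unfold pvCountA pvStrip
  have h := pv_go_sum (line.toList.length + 1) line.toList [] []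
  simp only [List.map_nil, List.sum_nil, List.countP_nil, Nat.zero_add] at h
  have hflat : ((PySem.Chars.splitOn line.toList ['-']).flatMap
      (fun word => word.filter (fun letter => pvIsVowel letter))).length
      = ((PySem.Chars.splitOn line.toList ['-']).map (fun w => w.countP pvIsVowel)).sum := by
    rw [List.length_flatMap]
    congr 1
    simp [List.countP_eq_length_filter]
  rw [hflat]
  have : PySem.Chars.splitOn line.toList ['-'] = PySem.Chars.splitOn.go ['-'] (line.toList.length + 1) line.toList [] [] := rfl
  rw [this, h]
  simp [List.countP_eq_length_filter]

lemma pv_loop_some (ls : List String) (n : Int) :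
    pvLoopA ls (some n) =
      (if ∀ l ∈ ls, pvCountA l = n then "Парам пам-пам" else "Пам парам") := by
  induction ls with
  | nil => simp [pvLoopA]
  | cons l rest ih =>
    simp only [pvLoopA]
    by_cases h : n = pvCountA l
    · rw [if_neg (not_not_intro h), ih]
      by_cases hrest : ∀ l' ∈ rest, pvCountA l' = n
      · rw [if_pos hrest, if_pos]
        intro x hx
        rcases List.mem_cons.mp hx with rfl | hx
        · exact h.symm
        · exact hrest x hx
      · rw [if_neg hrest, if_neg]
        intro hall
        exact hrest fun x hx => hall x (List.mem_cons_of_mem _ hx)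
    · rw [if_pos h, if_neg]
      intro hall
      exact h (hall l (List.mem_cons_self)).symm

-- the lockstep loop returns the all-equal string iff all stream lengths agree
lemma pv_lock_eq (ss : List (List Char)) :
    pvLock ss = (if ∀ s ∈ ss, ∀ t ∈ ss, s.length = t.length then "Парам пам-пам" else "Пам парам") := by
  induction ss using pvLock.induct with
  | case1 ss hall =>
    rw [pvLock, if_pos hall, if_pos]
    simp only [List.all_eq_true] at hall
    intro s hs t ht
    have hs0 : s = [] := by simpa using hall s hs
    have ht0 : t = [] := by simpa using hall t ht
    rw [hs0, ht0]
  | case2 ss hall hany =>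
    rw [pvLock, if_neg hall, if_pos hany, if_neg]
    simp only [List.all_eq_true, not_forall] at hall
    simp only [List.any_eq_true] at hany
    obtain ⟨t, ht, hte⟩ := hany
    have hte : t = [] := by simpa using hte
    obtain ⟨s, hs, hne⟩ := hall
    have hne : s ≠ [] := by simpa using hne
    intro h
    have := h s hs t ht
    subst hte
    simp at this
    exact hne this
  | case3 ss hall hany ih =>
    simp only [List.map_attach_eq_pmap, List.pmap_eq_map] at ih
    rw [pvLock, if_neg hall, if_neg hany, ih]
    simp only [List.any_eq_true, not_exists, not_and] at hany
    have hne : ∀ s ∈ ss, s ≠ [] := by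
      intro s hs
      have := hany s hs
      simpa using this
    refine if_congr ?_ rfl rfl
    constructor
    · intro h s hs t ht
      have := h (s.drop 1) (List.mem_map_of_mem hs) (t.drop 1) (List.mem_map_of_mem ht)
      have h1 := List.length_pos_iff.mpr (hne s hs)
      have h2 := List.length_pos_iff.mpr (hne t ht)
      simp at this; omega
    · intro h s hs t ht
      rcases List.mem_map.mp hs with ⟨s', hs', rfl⟩
      rcases List.mem_map.mp ht with ⟨t', ht', rfl⟩
      have h1 := List.length_pos_iff.mpr (hne s' hs')
      have h2 := List.length_pos_iff.mpr (hne t' ht')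
      have := h s' hs' t' ht'
      simp; omega

-- ===== VERDICT (by name: the statement is the Claim_ definition above) =====
theorem check_rhythm_spec : Claim_equal_check_rhythm := by
  intro poem _
  unfold Spec_check_rhythm check_rhythm check_rhythm_alt
  rw [pv_lock_eq]
  cases h : PySem.Str.split₀ poem with
  | nil => simp [pvLoopA]
  | cons l ls =>
    simp only [pvLoopA]
    rw [pv_loop_some]
    refine if_congr ?_ rfl rfl
    constructor
    · intro hall s hs t ht
      have key : ∀ x ∈ l :: ls, (pvStrip x).length = (pvStrip l).length := by
        intro x hx
        rcases List.mem_cons.mp hx with rfl | hx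
        · rfl
        · have := hall x hx
          rw [pv_count_strip, pv_count_strip] at this
          exact_mod_cast this
      rcases List.mem_map.mp hs with ⟨s', hs', rfl⟩
      rcases List.mem_map.mp ht with ⟨t', ht', rfl⟩
      rw [key s' (by simpa using hs'), key t' (by simpa using ht')]
    · intro h x hx
      have := h (pvStrip x) (List.mem_map_of_mem (List.mem_cons_of_mem _ hx))
        (pvStrip l) (List.mem_map_of_mem List.mem_cons_self)
      rw [pv_count_strip, pv_count_strip]
      exact_mod_cast this
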